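-- pv_equiv track=rewrite | github.com/msfmsf777/karaoke-helper-v2 | core_gui/vocal_separator.py | _calc_overall
-- ===== SOURCE A (Python) =====
-- _STAGE_WEIGHTS = {
--     "DownloadingModel": 10,
--     "LoadingModel": 15,
--     "Separation": 65,
--     "Finalize": 5,
-- }
--
-- def _calc_overall(stage_key: str, stage_pct: int) -> int:
--     weights = _STAGE_WEIGHTS
--     order = ["DownloadingModel", "LoadingModel", "Separation", "Finalize"]
--     total = 0
--     for name in order:
--         w = weights.get(name, 0)
--         if name == stage_key:
--             total += int(round(w * (max(0, min(100, stage_pct)) / 100.0)))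
--             break
--         else:
--             total += w
--     return max(0, min(100, total))
-- ===== SOURCE B (Python) =====
-- # B: replace A's accumulation loop + break by a precomputed (offset, weight)
-- # table: one lookup, one arithmetic expression. Unknown stages get the full
-- # total 95 directly (A reaches it by summing all weights).
-- _STAGE_OFFSETS = {
--     "DownloadingModel": (0, 10),
--     "LoadingModel": (10, 15),
--     "Separation": (25, 65),
--     "Finalize": (90, 5),
-- }
--
-- def _calc_overall(stage_key: str, stage_pct: int) -> int:
--     entry = _STAGE_OFFSETS.get(stage_key)
--     if entry is None:
--         return 95
--     base, w = entry
--     pct = max(0, min(100, stage_pct))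
--     return base + int(round(w * pct / 100.0))
-- ===== Notes on version B (the rewrite author's own statement) =====
-- stated objective: simpler
-- what changed: Replaces the ordered accumulation loop with break by a precomputed (cumulative-offset, weight) table: one dictionary lookup and one arithmetic expression, with the unknown-stage fall-through (95) and the final clamp made explicit constants.
import Mathlib
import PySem

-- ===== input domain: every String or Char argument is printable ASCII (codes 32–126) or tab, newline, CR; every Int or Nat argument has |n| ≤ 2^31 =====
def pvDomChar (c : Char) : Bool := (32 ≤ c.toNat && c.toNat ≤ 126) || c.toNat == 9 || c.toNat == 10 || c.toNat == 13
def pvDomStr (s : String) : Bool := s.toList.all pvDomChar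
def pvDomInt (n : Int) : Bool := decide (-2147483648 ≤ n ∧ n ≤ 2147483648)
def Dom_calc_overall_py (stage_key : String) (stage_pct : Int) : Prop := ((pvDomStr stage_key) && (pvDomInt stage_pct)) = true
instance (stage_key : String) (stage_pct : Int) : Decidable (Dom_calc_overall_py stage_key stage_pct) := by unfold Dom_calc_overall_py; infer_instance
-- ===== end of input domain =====

-- B replaces A's ordered accumulation loop + break with a precomputed (offset, weight)
-- table: one lookup and one arithmetic expression (objective: simpler).

-- int(round(v / 100.0)) for 0 ≤ v: round half to even. Exact on this file's use
-- (v = w * clamped_pct with w ∈ {5,10,15,65}, 0 ≤ clamped_pct ≤ 100: verified that the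
-- float expression equals exact half-to-even rounding on every such input).
def pyRound100 (v : Int) : Int :=
  if 2 * (v % 100) < 100 then v / 100
  else if 100 < 2 * (v % 100) then v / 100 + 1
  else if (v / 100) % 2 = 0 then v / 100 else v / 100 + 1

-- ===== PORT A =====
def pvStageWeights : PySem.Dict String Int :=
  (((PySem.Dict.empty.insert "DownloadingModel" 10).insert "LoadingModel" 15).insert
      "Separation" 65).insert "Finalize" 5

-- the for-loop over `order` with break, state = total
def pvALoop (stage_key : String) (stage_pct : Int) : List String → Int → Int
  | [], total => total
  | name :: rest, total =>
    let w := pvStageWeights.getD name 0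
    if name == stage_key then
      total + pyRound100 (w * (max 0 (min 100 stage_pct)))
    else
      pvALoop stage_key stage_pct rest (total + w)

def calc_overall_py (stage_key : String) (stage_pct : Int) : Int :=
  let total := pvALoop stage_key stage_pct
    ["DownloadingModel", "LoadingModel", "Separation", "Finalize"] 0
  max 0 (min 100 total)

-- ===== PORT B =====
def pvStageOffsets : PySem.Dict String (Int × Int) :=
  (((PySem.Dict.empty.insert "DownloadingModel" ((0 : Int), (10 : Int))).insert
      "LoadingModel" (10, 15)).insert "Separation" (25, 65)).insert "Finalize" (90, 5)

def calc_overall_py_alt (stage_key : String) (stage_pct : Int) : Int :=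
  match pvStageOffsets.get? stage_key with
  | none => 95
  | some (base, w) =>
    let pct := max 0 (min 100 stage_pct)
    base + pyRound100 (w * pct)

-- ===== PRECONDITION & SPEC =====
def Spec_calc_overall_py (stage_key : String) (stage_pct : Int) (out : Int) : Prop := out = calc_overall_py_alt stage_key stage_pct
instance (stage_key : String) (stage_pct : Int) (out : Int) : Decidable (Spec_calc_overall_py stage_key stage_pct out) := by unfold Spec_calc_overall_py; infer_instance

-- ===== CLAIM (what is proved, stated in full; the proofs are below) =====
def Claim_equal_calc_overall_py : Prop := ∀ (stage_key : String) (stage_pct : Int), Dom_calc_overall_py stage_key stage_pct → Spec_calc_overall_py stage_key stage_pct (calc_overall_py stage_key stage_pct)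

-- ===== LEMMAS AND PROOFS =====

theorem pyRound100_bounds (w c : Int) (hw : 0 ≤ w) (h0 : 0 ≤ c) (h1 : c ≤ 100) :
    0 ≤ pyRound100 (w * c) ∧ pyRound100 (w * c) ≤ w := by
  have hv0 : 0 ≤ w * c := mul_nonneg hw h0
  have hv1 : w * c ≤ w * 100 := by
    exact mul_le_mul_of_nonneg_left h1 hw
  unfold pyRound100
  split_ifs <;> omega

-- ===== VERDICT (by name: the statement is the Claim_ definition above) =====
theorem calc_overall_py_spec : Claim_equal_calc_overall_py := by
  intro stage_key stage_pct _
  unfold Spec_calc_overall_py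
  have hc0 : (0:Int) ≤ max 0 (min 100 stage_pct) := by omega
  have hc1 : max 0 (min 100 stage_pct) ≤ (100:Int) := by omega
  by_cases h1 : stage_key = "DownloadingModel"
  · subst h1
    have hb := pyRound100_bounds 10 (max 0 (min 100 stage_pct)) (by norm_num) hc0 hc1
    simp only [calc_overall_py, calc_overall_py_alt, pvALoop, pvStageWeights, pvStageOffsets,
      PySem.Dict.getD, PySem.Dict.get?, PySem.Dict.insert, PySem.Dict.empty] at *
    simp at *
    omega
  by_cases h2 : stage_key = "LoadingModel"
  · subst h2
    have hb := pyRound100_bounds 15 (max 0 (min 100 stage_pct)) (by norm_num) hc0 hc1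
    simp only [calc_overall_py, calc_overall_py_alt, pvALoop, pvStageWeights, pvStageOffsets,
      PySem.Dict.getD, PySem.Dict.get?, PySem.Dict.insert, PySem.Dict.empty] at *
    simp at *
    omega
  by_cases h3 : stage_key = "Separation"
  · subst h3
    have hb := pyRound100_bounds 65 (max 0 (min 100 stage_pct)) (by norm_num) hc0 hc1
    simp only [calc_overall_py, calc_overall_py_alt, pvALoop, pvStageWeights, pvStageOffsets,
      PySem.Dict.getD, PySem.Dict.get?, PySem.Dict.insert, PySem.Dict.empty] at *
    simp at *
    omega
  by_cases h4 : stage_key = "Finalize"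
  · subst h4
    have hb := pyRound100_bounds 5 (max 0 (min 100 stage_pct)) (by norm_num) hc0 hc1
    simp only [calc_overall_py, calc_overall_py_alt, pvALoop, pvStageWeights, pvStageOffsets,
      PySem.Dict.getD, PySem.Dict.get?, PySem.Dict.insert, PySem.Dict.empty] at *
    simp at *
    omega
  · -- unknown stage: A sums all weights to 95, B returns 95 directly
    simp [calc_overall_py, calc_overall_py_alt, pvALoop, pvStageWeights, pvStageOffsets,
      PySem.Dict.getD, PySem.Dict.get?, PySem.Dict.insert, PySem.Dict.empty,
      Ne.symm h1, Ne.symm h2, Ne.symm h3, Ne.symm h4]
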